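-- pv_equiv track=rewrite | github.com/MattesR/infinigram_explorer | oracle_analysis.py | _find_token_positions
-- ===== SOURCE A (Python) =====
-- def _find_token_positions(doc_tokens, pattern):
--     """
--     Find all positions where a token pattern (sequence of IDs) matches
--     in a document's token array.
--
--     Returns list of start positions.
--     """
--     doc_tokens = list(doc_tokens)
--     pattern = list(pattern)
--     positions = []
--     for i in range(len(doc_tokens) - len(pattern) + 1):
--         if doc_tokens[i:i+len(pattern)] == pattern:
--             positions.append(i)
--     return positions
-- ===== SOURCE B (Python) =====
-- def _find_token_positions(doc_tokens, pattern):
--     """Rabin-Karp matcher: a rolling modular fingerprint of the current window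
--     is updated in O(1) per position; the window is compared to the pattern
--     only when the fingerprints agree."""
--     doc = list(doc_tokens)
--     pat = list(pattern)
--     n = len(doc)
--     m = len(pat)
--     if m == 0:
--         return list(range(n + 1))
--     if m > n:
--         return []
--     MOD = 2 ** 61 - 1
--     BASE = 2 ** 33
--     OFF = 2 ** 31
--     hp = 0
--     for t in pat:
--         hp = (hp * BASE + (t + OFF)) % MOD
--     h = 0
--     for t in doc[:m]:
--         h = (h * BASE + (t + OFF)) % MOD
--     top = 1
--     for _ in range(m - 1):
--         top = top * BASE % MOD
--     positions = []
--     for i in range(n - m + 1):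
--         if h == hp and doc[i:i + m] == pat:
--             positions.append(i)
--         if i + m < n:
--             h = ((h - (doc[i] + OFF) * top) * BASE + (doc[i + m] + OFF)) % MOD
--     return positions
-- ===== Notes on version B (the rewrite author's own statement) =====
-- stated objective: alternative
-- what changed: Replaced the per-position slice-and-compare scan with Rabin-Karp: a rolling modular fingerprint of the current window is maintained in O(1) per position and the window is compared to the pattern only on a fingerprint hit.
import Mathlib
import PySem

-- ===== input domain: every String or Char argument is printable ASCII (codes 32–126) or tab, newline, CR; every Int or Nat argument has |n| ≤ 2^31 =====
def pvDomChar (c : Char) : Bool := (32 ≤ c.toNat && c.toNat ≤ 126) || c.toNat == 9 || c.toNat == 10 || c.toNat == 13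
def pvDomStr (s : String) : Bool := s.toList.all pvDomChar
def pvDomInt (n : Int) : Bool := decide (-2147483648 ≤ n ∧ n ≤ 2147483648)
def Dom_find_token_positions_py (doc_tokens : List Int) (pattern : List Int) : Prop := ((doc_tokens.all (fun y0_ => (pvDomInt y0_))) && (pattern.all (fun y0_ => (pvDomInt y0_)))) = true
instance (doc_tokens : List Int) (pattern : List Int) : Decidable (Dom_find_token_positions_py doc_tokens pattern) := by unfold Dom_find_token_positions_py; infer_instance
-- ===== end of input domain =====

-- B replaces A's per-position slice-and-compare scan with a Rabin–Karp rolling modular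
-- fingerprint (window compared to the pattern only on a fingerprint hit) — a different
-- algorithm of the same proved return value ("alternative": not measured faster).

-- ===== PORT A =====
def find_token_positions_py (doc_tokens : List Int) (pattern : List Int) : List Int :=
  -- doc_tokens = list(doc_tokens); pattern = list(pattern)  (identity on List Int)
  (PySem.List.pyRange 0 ((doc_tokens.length : Int) - (pattern.length : Int) + 1) 1).foldl
    (fun positions i =>
      if PySem.List.slice doc_tokens (some i) (some (i + (pattern.length : Int))) = pattern
      then positions ++ [i] else positions) []

-- ===== PORT B =====
def find_token_positions_py_alt (doc_tokens : List Int) (pattern : List Int) : List Int :=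
  let doc := doc_tokens
  let pat := pattern
  let n : Int := doc.length
  let m : Int := pat.length
  if m = 0 then PySem.List.pyRange 0 (n + 1) 1
  else if m > n then []
  else
    let MOD : Int := 2 ^ 61 - 1
    let BASE : Int := 2 ^ 33
    let OFF : Int := 2 ^ 31
    let hp : Int := pat.foldl (fun h t => PySem.Int.mod (h * BASE + (t + OFF)) MOD) 0
    let h0 : Int := (PySem.List.slice doc none (some m)).foldl (fun h t => PySem.Int.mod (h * BASE + (t + OFF)) MOD) 0
    let top : Int := (PySem.List.pyRange 0 (m - 1) 1).foldl (fun t _ => PySem.Int.mod (t * BASE) MOD) 1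
    let res := (PySem.List.pyRange 0 (n - m + 1) 1).foldl
      (fun (st : Int × List Int) i =>
        let st1 := if st.1 = hp ∧ PySem.List.slice doc (some i) (some (i + m)) = pat
          then (st.1, st.2 ++ [i]) else st
        if i + m < n then
          (PySem.Int.mod ((st1.1 - (PySem.List.pyGetD doc i 0 + OFF) * top) * BASE
              + (PySem.List.pyGetD doc (i + m) 0 + OFF)) MOD, st1.2)
        else st1)
      (h0, ([] : List Int))
    res.2

-- ===== PRECONDITION & SPEC =====
def Spec_find_token_positions_py (doc_tokens : List Int) (pattern : List Int) (out : List Int) : Prop := out = find_token_positions_py_alt doc_tokens pattern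
instance (doc_tokens : List Int) (pattern : List Int) (out : List Int) : Decidable (Spec_find_token_positions_py doc_tokens pattern out) := by unfold Spec_find_token_positions_py; infer_instance

-- ===== CLAIM (what is proved, stated in full; the proofs are below) =====
def Claim_equal_find_token_positions_py : Prop := ∀ (doc_tokens : List Int) (pattern : List Int), Dom_find_token_positions_py doc_tokens pattern → Spec_find_token_positions_py doc_tokens pattern (find_token_positions_py doc_tokens pattern)

-- ===== LEMMAS AND PROOFS =====

-- the exact fingerprint of a token list (base-2^33 digits t + 2^31)
def pvHsh (l : List Int) : Int := l.foldl (fun h t => h * 2 ^ 33 + (t + 2 ^ 31)) 0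
lemma pvHsh_foldl (l : List Int) (h0 : Int) :
    l.foldl (fun h t => h * 2 ^ 33 + (t + 2 ^ 31)) h0
      = h0 * (2 ^ 33 : Int) ^ l.length + pvHsh l := by
  induction l generalizing h0 with
  | nil => simp [pvHsh]
  | cons a l ih =>
    simp only [List.foldl_cons, List.length_cons, pvHsh]
    rw [ih (h0 * 2 ^ 33 + (a + 2 ^ 31)), ih (0 * 2 ^ 33 + (a + 2 ^ 31))]
    ring

lemma pvHsh_cons (a : Int) (l : List Int) :
    pvHsh (a :: l) = (a + 2 ^ 31) * (2 ^ 33 : Int) ^ l.length + pvHsh l := by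
  have := pvHsh_foldl l (0 * 2 ^ 33 + (a + 2 ^ 31))
  simpa [pvHsh] using this

lemma pvHsh_append (l : List Int) (a : Int) :
    pvHsh (l ++ [a]) = pvHsh l * 2 ^ 33 + (a + 2 ^ 31) := by
  simp [pvHsh, List.foldl_append]

def pvWin (doc : List Int) (i m : Nat) : List Int := (doc.drop i).take m

lemma pvWin_length (doc : List Int) (i m : Nat) (h : i + m ≤ doc.length) :
    (pvWin doc i m).length = m := by
  simp [pvWin]; omega

lemma pvWin_cons (doc : List Int) (i m : Nat) (hi : i < doc.length) (hm : 1 ≤ m) :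
    pvWin doc i m = doc.getD i 0 :: pvWin doc (i + 1) (m - 1) := by
  unfold pvWin
  obtain ⟨m', rfl⟩ : ∃ m', m = m' + 1 := ⟨m - 1, by omega⟩
  rw [List.getD_eq_getElem doc 0 hi]
  conv_lhs => rw [← List.getElem_cons_drop (h := hi)]
  rw [List.take_succ_cons]
  simp

lemma pvWin_snoc (doc : List Int) (i m : Nat) (him : i + m < doc.length) (hm : 1 ≤ m) :
    pvWin doc (i + 1) m = pvWin doc (i + 1) (m - 1) ++ [doc.getD (i + m) 0] := by
  unfold pvWin
  obtain ⟨m', rfl⟩ : ∃ m', m = m' + 1 := ⟨m - 1, by omega⟩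
  rw [List.take_add_one]
  have he : i + 1 + m' = i + (m' + 1) := by omega
  rw [List.getElem?_drop, he, List.getElem?_eq_getElem (by omega),
      List.getD_eq_getElem doc 0 (by omega)]
  simp

lemma pvHsh_roll (doc : List Int) (i m : Nat) (hm : 1 ≤ m) (him : i + m < doc.length) :
    pvHsh (pvWin doc (i + 1) m)
      = (pvHsh (pvWin doc i m) - (doc.getD i 0 + 2 ^ 31) * (2 ^ 33 : Int) ^ (m - 1)) * 2 ^ 33
          + (doc.getD (i + m) 0 + 2 ^ 31) := by
  have hlenw : (pvWin doc (i + 1) (m - 1)).length = m - 1 := pvWin_length _ _ _ (by omega)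
  have h1 : pvHsh (pvWin doc i m)
      = (doc.getD i 0 + 2 ^ 31) * (2 ^ 33 : Int) ^ (m - 1) + pvHsh (pvWin doc (i + 1) (m - 1)) := by
    rw [pvWin_cons doc i m (by omega) hm, pvHsh_cons, hlenw]
  rw [pvWin_snoc doc i m him hm, pvHsh_append, h1]
  ring

def pvMod : Int := 2 ^ 61 - 1

lemma pv_emod_modeq (a : Int) : a % pvMod ≡ a [ZMOD pvMod] :=
  Int.emod_emod_of_dvd a dvd_rfl

lemma pvHm_eq (l : List Int) : ∀ h0 : Int,
    l.foldl (fun h t => (h * 2 ^ 33 + (t + 2 ^ 31)) % pvMod) (h0 % pvMod)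
      = (l.foldl (fun h t => h * 2 ^ 33 + (t + 2 ^ 31)) h0) % pvMod := by
  induction l with
  | nil => intro h0; simp
  | cons a l ih =>
    intro h0
    simp only [List.foldl_cons]
    have e : ((h0 % pvMod) * 2 ^ 33 + (a + 2 ^ 31)) % pvMod
        = (h0 * 2 ^ 33 + (a + 2 ^ 31)) % pvMod :=
      ((pv_emod_modeq h0).mul_right (2 ^ 33)).add_right (a + 2 ^ 31)
    rw [e, ← ih (h0 * 2 ^ 33 + (a + 2 ^ 31))]

lemma pvTop_eq : ∀ (j : Nat) (x : Int),
    (PySem.List.pyRange 0 (j : Int) 1).foldl (fun t _ => t * 2 ^ 33 % pvMod) (x % pvMod)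
      = (x * (2 ^ 33 : Int) ^ j) % pvMod := by
  intro j
  induction j with
  | zero => intro x; simp
  | succ j ih =>
    intro x
    rw [show ((j + 1 : Nat) : Int) = (j : Int) + 1 by push_cast; ring]
    rw [PySem.List.pyRange_one_succ_right (by omega), List.foldl_append]
    simp only [List.foldl_cons, List.foldl_nil]
    rw [ih x]
    have e : ((x * (2 ^ 33 : Int) ^ j) % pvMod) * 2 ^ 33 % pvMod
        = (x * (2 ^ 33 : Int) ^ j * 2 ^ 33) % pvMod :=
      (pv_emod_modeq (x * (2 ^ 33 : Int) ^ j)).mul_right (2 ^ 33)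
    rw [e]
    congr 1
    ring

lemma pvStepMod (doc : List Int) (k m : Nat) (hm : 1 ≤ m) (him : k + m < doc.length) :
    ((pvHsh (pvWin doc k m) % pvMod
        - (doc.getD k 0 + 2 ^ 31) * ((2 ^ 33 : Int) ^ (m - 1) % pvMod)) * 2 ^ 33
      + (doc.getD (k + m) 0 + 2 ^ 31)) % pvMod
    = pvHsh (pvWin doc (k + 1) m) % pvMod := by
  rw [pvHsh_roll doc k m hm him]
  exact (((pv_emod_modeq (pvHsh (pvWin doc k m))).sub
    ((Int.ModEq.refl (doc.getD k 0 + 2 ^ 31)).mul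
      (pv_emod_modeq ((2 ^ 33 : Int) ^ (m - 1))))).mul_right (2 ^ 33)).add_right
    (doc.getD (k + m) 0 + 2 ^ 31)

lemma pv_loop (doc pat : List Int) (hp top : Int)
    (hhp : hp = pvHsh pat % pvMod)
    (htop : top = (2 ^ 33 : Int) ^ (pat.length - 1) % pvMod)
    (hm : 1 ≤ pat.length) (hmn : pat.length ≤ doc.length) :
    ∀ (d k : Nat) (acc : List Int), k + d = doc.length - pat.length →
    ((PySem.List.pyRange (k : Int) ((doc.length : Int) - (pat.length : Int) + 1) 1).foldl
        (fun (st : Int × List Int) i =>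
          let st1 := if st.1 = hp ∧ PySem.List.slice doc (some i) (some (i + (pat.length : Int))) = pat
            then (st.1, st.2 ++ [i]) else st
          if i + (pat.length : Int) < (doc.length : Int) then
            (((st1.1 - (PySem.List.pyGetD doc i 0 + 2 ^ 31) * top) * 2 ^ 33
                + (PySem.List.pyGetD doc (i + (pat.length : Int)) 0 + 2 ^ 31)) % pvMod, st1.2)
          else st1)
        (pvHsh (pvWin doc k pat.length) % pvMod, acc)).2
      = acc ++ (PySem.List.pyRange (k : Int) ((doc.length : Int) - (pat.length : Int) + 1) 1).filter
          (fun i => decide (pvWin doc i.toNat pat.length = pat)) := by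
  subst hhp htop
  intro d
  induction d with
  | zero =>
    intro k acc hk
    have hb : ((doc.length : Int) - (pat.length : Int) + 1) = (k : Int) + 1 := by omega
    rw [hb, PySem.List.pyRange_one_singleton]
    simp only [List.foldl_cons, List.foldl_nil]
    have hcond : ¬ ((k : Int) + (pat.length : Int) < (doc.length : Int)) := by omega
    have hslice : PySem.List.slice doc (some (k : Int)) (some ((k : Int) + (pat.length : Int))) = pvWin doc k pat.length :=
      PySem.List.slice_natCast_add doc k pat.length
    by_cases hw : pvWin doc k pat.length = pat
    · simp [hcond, List.filter, Int.toNat_natCast, hslice, hw]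
    · simp [hcond, List.filter, Int.toNat_natCast, hslice, hw]
  | succ d ih =>
    intro k acc hk
    have hcons : PySem.List.pyRange (k : Int) ((doc.length : Int) - (pat.length : Int) + 1) 1
        = (k : Int) :: PySem.List.pyRange ((k : Int) + 1) ((doc.length : Int) - (pat.length : Int) + 1) 1 :=
      PySem.List.pyRange_one_cons (by omega)
    rw [hcons]
    simp only [List.foldl_cons, List.filter_cons]
    have hcond : ((k : Int) + (pat.length : Int) < (doc.length : Int)) := by omega
    have hslice : PySem.List.slice doc (some (k : Int)) (some ((k : Int) + (pat.length : Int))) = pvWin doc k pat.length :=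
      PySem.List.slice_natCast_add doc k pat.length
    have hge1 : PySem.List.pyGetD doc (k : Int) 0 = doc.getD k 0 :=
      PySem.List.pyGetD_natCast doc k 0
    have hge2 : PySem.List.pyGetD doc ((k : Int) + (pat.length : Int)) 0 = doc.getD (k + pat.length) 0 := by
      rw [show ((k : Int) + (pat.length : Int)) = ((k + pat.length : Nat) : Int) by push_cast; ring]
      exact PySem.List.pyGetD_natCast doc (k + pat.length) 0
    have hstep := pvStepMod doc k pat.length hm (by omega)
    have hcast : ((k : Int) + 1) = ((k + 1 : Nat) : Int) := by push_cast; ring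
    by_cases hw : pvWin doc k pat.length = pat
    · simp only [hslice, hw, if_pos hcond, and_self, if_true, hge1, hge2]
      rw [hw] at hstep
      rw [hstep, hcast, ih (k + 1) (acc ++ [(k : Int)]) (by omega)]
      simp [Int.toNat_natCast, hw, List.append_assoc]
    · simp only [hslice, if_pos hcond, hge1, hge2]
      rw [if_neg (fun hC => hw hC.2)]
      rw [hstep, hcast, ih (k + 1) acc (by omega)]
      simp [Int.toNat_natCast, hw]

lemma pv_main (doc pat : List Int) (_hdom : Dom_find_token_positions_py doc pat) :
    find_token_positions_py doc pat = find_token_positions_py_alt doc pat := by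
  have hA : find_token_positions_py doc pat
      = (PySem.List.pyRange 0 ((doc.length : Int) - (pat.length : Int) + 1) 1).filter
          (fun i => decide (pvWin doc i.toNat pat.length = pat)) := by
    rw [find_token_positions_py, PySem.List.foldl_append_ite_eq_filter]
    rw [List.nil_append]
    apply List.filter_congr
    intro i hi
    have h0i : 0 ≤ i := (PySem.List.mem_pyRange_one.mp hi).1
    have hs : PySem.List.slice doc (some i) (some (i + (pat.length : Int)))
        = pvWin doc i.toNat pat.length := by
      rw [PySem.List.slice_toNat doc h0i (by omega)]
      unfold pvWin
      congr 1
      omega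
    rw [hs]
  rw [hA]
  by_cases hm0 : pat.length = 0
  · have : pat = [] := List.length_eq_zero_iff.mp hm0
    subst this
    rw [find_token_positions_py_alt]
    simp only [List.length_nil, Nat.cast_zero, sub_zero]
    apply List.filter_eq_self.mpr
    intro i hi
    simp [pvWin]
  · by_cases hmn : doc.length < pat.length
    · rw [find_token_positions_py_alt]
      rw [if_neg (by omega : ¬ ((pat.length : Int) = 0))]
      rw [if_pos (by exact_mod_cast Nat.cast_lt.mpr hmn)]
      rw [PySem.List.pyRange_one_eq_nil (by omega)]
      simp
    · have hm : 1 ≤ pat.length := by omega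
      have hmn' : pat.length ≤ doc.length := by omega
      rw [find_token_positions_py_alt]
      simp only []
      rw [if_neg (by omega : ¬ ((pat.length : Int) = 0))]
      rw [if_neg (by omega : ¬ ((pat.length : Int) > (doc.length : Int)))]
      have hmodAll : ∀ a : Int, PySem.Int.mod a (2 ^ 61 - 1) = a % (2 ^ 61 - 1) :=
        fun a => PySem.Int.mod_eq_emod_of_pos (by norm_num)
      simp only [hmodAll]
      rw [show ((2 : Int) ^ 61 - 1) = pvMod from rfl]
      have hhp : pat.foldl (fun h t => (h * 2 ^ 33 + (t + 2 ^ 31)) % pvMod) 0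
          = pvHsh pat % pvMod := by
        rw [show (0 : Int) = 0 % pvMod by norm_num [pvMod]]
        exact pvHm_eq pat 0
      have hh0 : (PySem.List.slice doc none (some (pat.length : Int))).foldl
          (fun h t => (h * 2 ^ 33 + (t + 2 ^ 31)) % pvMod) 0
          = pvHsh (pvWin doc 0 pat.length) % pvMod := by
        rw [PySem.List.slice_to_natCast]
        rw [show (0 : Int) = 0 % pvMod by norm_num [pvMod]]
        exact pvHm_eq (doc.take pat.length) 0
      have htop : (PySem.List.pyRange 0 ((pat.length : Int) - 1) 1).foldl
          (fun t _ => t * 2 ^ 33 % pvMod) 1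
          = (2 ^ 33 : Int) ^ (pat.length - 1) % pvMod := by
        rw [show ((pat.length : Int) - 1) = ((pat.length - 1 : Nat) : Int) by omega]
        have h1 := pvTop_eq (pat.length - 1) 1
        rw [show ((1 : Int) % pvMod) = 1 by norm_num [pvMod], one_mul] at h1
        exact h1
      rw [hhp, hh0, htop]
      have := pv_loop doc pat (pvHsh pat % pvMod) ((2 ^ 33 : Int) ^ (pat.length - 1) % pvMod)
        rfl rfl hm hmn' (doc.length - pat.length) 0 [] (by omega)
      simp only [Nat.cast_zero] at this
      rw [this, List.nil_append]

-- ===== VERDICT (by name: the statement is the Claim_ definition above) =====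
theorem find_token_positions_py_spec : Claim_equal_find_token_positions_py :=
  fun doc_tokens pattern hdom => pv_main doc_tokens pattern hdom
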